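-- pv_equiv track=rewrite | github.com/Varunshah03/Job-matcher-AI | backend/app/core/job_matcher.py | _is_skill_match
-- ===== SOURCE A (Python) =====
-- def _is_skill_match(user_skill: str, job_skill: str) -> bool:
--     """Check if user skill matches job skill (including partial matches)"""
--     # Direct match
--     if user_skill == job_skill:
--         return True
--
--     # Check if one is contained in the other
--     if user_skill in job_skill or job_skill in user_skill:
--         return True
--
--     # Handle common variations
--     skill_variations = {
--         'javascript': ['js', 'ecmascript', 'es6', 'es2015'],
--         'typescript': ['ts'],
--         'python': ['py'],
--         'react': ['reactjs', 'react.js'],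
--         'vue': ['vuejs', 'vue.js'],
--         'angular': ['angularjs'],
--         'node.js': ['nodejs', 'node'],
--         'postgresql': ['postgres'],
--         'mongodb': ['mongo'],
--         'machine learning': ['ml', 'ai', 'artificial intelligence']
--     }
--
--     for main_skill, variations in skill_variations.items():
--         if (user_skill == main_skill and job_skill in variations) or \
--            (job_skill == main_skill and user_skill in variations) or \
--            (user_skill in variations and job_skill == main_skill) or \
--            (job_skill in variations and user_skill == main_skill):
--             return True
--
--     return False
-- ===== SOURCE B (Python) =====
-- SKILL_VARIATIONS = {
--     'javascript': ['js', 'ecmascript', 'es6', 'es2015'],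
--     'typescript': ['ts'],
--     'python': ['py'],
--     'react': ['reactjs', 'react.js'],
--     'vue': ['vuejs', 'vue.js'],
--     'angular': ['angularjs'],
--     'node.js': ['nodejs', 'node'],
--     'postgresql': ['postgres'],
--     'mongodb': ['mongo'],
--     'machine learning': ['ml', 'ai', 'artificial intelligence'],
-- }
--
-- # Flat reverse lookup: variation -> its main skill (built once).
-- VAR_TO_MAIN = {v: m for m, variations in SKILL_VARIATIONS.items() for v in variations}
--
--
-- def _is_skill_match(user_skill: str, job_skill: str) -> bool:
--     """Check if user skill matches job skill (including partial matches)"""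
--     if user_skill == job_skill:
--         return True
--     if user_skill in job_skill or job_skill in user_skill:
--         return True
--     return (VAR_TO_MAIN.get(user_skill) == job_skill
--             or VAR_TO_MAIN.get(job_skill) == user_skill)
-- ===== Notes on version B (the rewrite author's own statement) =====
-- stated objective: simpler
-- what changed: The scan over the variation groups with a four-way per-entry condition is replaced by a flat variation->main reverse-lookup dict built once, so the match is two dict lookups instead of a loop.
import Mathlib
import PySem

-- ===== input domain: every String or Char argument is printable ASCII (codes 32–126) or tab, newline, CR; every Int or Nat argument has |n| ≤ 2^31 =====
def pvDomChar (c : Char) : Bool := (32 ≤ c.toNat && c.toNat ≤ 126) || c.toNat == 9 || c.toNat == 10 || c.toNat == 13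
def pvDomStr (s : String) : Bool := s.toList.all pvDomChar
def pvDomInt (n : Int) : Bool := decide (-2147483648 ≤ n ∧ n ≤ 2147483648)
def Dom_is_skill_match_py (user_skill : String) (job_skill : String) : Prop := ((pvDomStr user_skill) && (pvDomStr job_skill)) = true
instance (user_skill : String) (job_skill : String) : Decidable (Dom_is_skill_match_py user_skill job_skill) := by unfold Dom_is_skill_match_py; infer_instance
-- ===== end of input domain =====

-- B replaces A's scan over the variation groups by a single flat variation→main
-- reverse-lookup dict built once (objective: simpler); equality and substring checks are kept.

-- ===== PORT A =====
-- the skill_variations dict literal (shared data: both Pythons carry the same literal)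
def skillVariations : List (String × List String) := [
  ("javascript", ["js", "ecmascript", "es6", "es2015"]),
  ("typescript", ["ts"]),
  ("python", ["py"]),
  ("react", ["reactjs", "react.js"]),
  ("vue", ["vuejs", "vue.js"]),
  ("angular", ["angularjs"]),
  ("node.js", ["nodejs", "node"]),
  ("postgresql", ["postgres"]),
  ("mongodb", ["mongo"]),
  ("machine learning", ["ml", "ai", "artificial intelligence"])]

-- A's for-loop over skill_variations.items() with its four-way condition
def loopA : List (String × List String) → String → String → Bool
  | [], _, _ => false
  | (m, vs) :: rest, u, j =>
    if (u == m && vs.contains j) || (j == m && vs.contains u)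
       || (vs.contains u && j == m) || (vs.contains j && u == m) then true
    else loopA rest u j

def is_skill_match_py (user_skill : String) (job_skill : String) : Bool :=
  if user_skill == job_skill then true
  else if PySem.Str.isIn user_skill job_skill || PySem.Str.isIn job_skill user_skill then true
  else loopA skillVariations user_skill job_skill

-- ===== PORT B =====
-- VAR_TO_MAIN = {v: m for m, variations in SKILL_VARIATIONS.items() for v in variations}
def varToMain : PySem.Dict String String :=
  skillVariations.foldl (fun d p => p.2.foldl (fun d v => d.insert v p.1) d) PySem.Dict.empty

def is_skill_match_py_alt (user_skill : String) (job_skill : String) : Bool :=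
  if user_skill == job_skill then true
  else if PySem.Str.isIn user_skill job_skill || PySem.Str.isIn job_skill user_skill then true
  else (varToMain.get? user_skill == some job_skill) || (varToMain.get? job_skill == some user_skill)

-- ===== PRECONDITION & SPEC =====
def Spec_is_skill_match_py (user_skill : String) (job_skill : String) (out : Bool) : Prop := out = is_skill_match_py_alt user_skill job_skill
instance (user_skill : String) (job_skill : String) (out : Bool) : Decidable (Spec_is_skill_match_py user_skill job_skill out) := by unfold Spec_is_skill_match_py; infer_instance

-- ===== CLAIM (what is proved, stated in full; the proofs are below) =====
def Claim_equal_is_skill_match_py : Prop := ∀ (user_skill : String) (job_skill : String), Dom_is_skill_match_py user_skill job_skill → Spec_is_skill_match_py user_skill job_skill (is_skill_match_py user_skill job_skill)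

-- ===== LEMMAS AND PROOFS =====

-- the flat reverse-lookup list varToMain computes to
def flatPairs : List (String × String) :=
  [("js", "javascript"), ("ecmascript", "javascript"), ("es6", "javascript"), ("es2015", "javascript"),
   ("ts", "typescript"), ("py", "python"), ("reactjs", "react"), ("react.js", "react"),
   ("vuejs", "vue"), ("vue.js", "vue"), ("angularjs", "angular"), ("nodejs", "node.js"),
   ("node", "node.js"), ("postgres", "postgresql"), ("mongo", "mongodb"),
   ("ml", "machine learning"), ("ai", "machine learning"), ("artificial intelligence", "machine learning")]

theorem varToMain_eq : varToMain = PySem.Dict.mk flatPairs := by decide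

theorem flat_nodup : (flatPairs.map Prod.fst).Nodup := by decide

theorem flatPairs_eq : flatPairs =
    skillVariations.flatMap (fun p => p.2.map fun v => (v, p.1)) := by rfl

-- A's loop returns true iff some group matches main-vs-variation in either direction
theorem loopA_iff (L : List (String × List String)) (u j : String) :
    loopA L u j = true ↔ ∃ p ∈ L, (u = p.1 ∧ j ∈ p.2) ∨ (j = p.1 ∧ u ∈ p.2) := by
  induction L with
  | nil => simp [loopA]
  | cons hd tl ih =>
    obtain ⟨m, vs⟩ := hd
    simp only [loopA, List.exists_mem_cons_iff]
    split_ifs with h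
    · simp only [true_iff]
      left
      simp only [Bool.or_eq_true, Bool.and_eq_true, beq_iff_eq, List.contains_iff_mem] at h
      tauto
    · rw [ih]
      simp only [Bool.or_eq_true, Bool.and_eq_true, beq_iff_eq, List.contains_iff_mem] at h
      constructor
      · intro hh; right; exact hh
      · rintro (hh | hh)
        · exact absurd (by tauto) h
        · exact hh

-- first-match lookup on a nodup-key assoc list is membership
theorem get?_mk_eq_some_iff (L : List (String × String)) (hn : (L.map Prod.fst).Nodup)
    (u j : String) : (PySem.Dict.mk L).get? u = some j ↔ (u, j) ∈ L := by
  induction L with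
  | nil => simp [PySem.Dict.get?]
  | cons hd tl ih =>
    obtain ⟨k, v⟩ := hd
    simp only [List.map_cons, List.nodup_cons] at hn
    rw [PySem.Dict.get?_mk_cons]
    by_cases hk : k = u
    · subst hk
      simp only [beq_self_eq_true, if_true, List.mem_cons, Option.some_inj, Prod.mk.injEq,
        true_and]
      constructor
      · rintro rfl; left; rfl
      · rintro (rfl | hmem)
        · rfl
        · exact absurd (List.mem_map_of_mem (f := Prod.fst) hmem) (by simpa using hn.1)
    · simp only [beq_iff_eq, hk, if_false, List.mem_cons, Prod.mk.injEq]
      rw [ih hn.2]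
      constructor
      · intro h; right; exact h
      · rintro (⟨rfl, _⟩ | h)
        · exact absurd rfl hk
        · exact h

theorem flat_mem_iff (L : List (String × List String)) (a b : String) :
    (a, b) ∈ L.flatMap (fun p => p.2.map fun v => (v, p.1)) ↔
      ∃ p ∈ L, b = p.1 ∧ a ∈ p.2 := by
  simp only [List.mem_flatMap, List.mem_map, Prod.mk.injEq]
  constructor
  · rintro ⟨p, hp, v, hv, rfl, rfl⟩; exact ⟨p, hp, rfl, hv⟩
  · rintro ⟨p, hp, rfl, ha⟩; exact ⟨p, hp, a, ha, rfl, rfl⟩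

-- the heart: A's loop equals B's two reverse lookups
theorem loop_eq_lookup (u j : String) : loopA skillVariations u j =
    ((varToMain.get? u == some j) || (varToMain.get? j == some u)) := by
  rw [Bool.eq_iff_iff]
  rw [loopA_iff]
  rw [varToMain_eq]
  simp only [Bool.or_eq_true, beq_iff_eq]
  rw [get?_mk_eq_some_iff flatPairs flat_nodup, get?_mk_eq_some_iff flatPairs flat_nodup,
    flatPairs_eq, flat_mem_iff, flat_mem_iff]
  simp only [and_or_left, exists_or]
  rw [or_comm]

-- ===== VERDICT (by name: the statement is the Claim_ definition above) =====
theorem is_skill_match_py_spec : Claim_equal_is_skill_match_py := by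
  intro u j _
  unfold Spec_is_skill_match_py is_skill_match_py is_skill_match_py_alt
  split_ifs
  · rfl
  · rfl
  · exact loop_eq_lookup u j
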